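-- pv_equiv track=rewrite | github.com/ot3107487/FP--py- | dei.py | dei
-- ===== SOURCE A (Python) =====
-- def dei(l):
--     if len(l)==1:
--         if l[0]<=0:
--             return l[0]
--         else:
--             return 1
--     m=len(l)//2
--     aux1=dei(l[:m])
--     aux2=dei(l[m:])
--     return aux1*aux2
-- ===== SOURCE B (Python) =====
-- def dei(l):
--     p = 1
--     for x in l:
--         p *= x if x <= 0 else 1
--     return p
-- ===== Notes on version B (the rewrite author's own statement) =====
-- stated objective: simpler
-- what changed: Replaces A's binary divide-and-conquer recursion (slicing the list in half and multiplying the two recursive products) by a single iterative left-to-right accumulator loop.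
-- outside the precondition, e.g. on dei([]): A raises RecursionError, B returns 1
import Mathlib
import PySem

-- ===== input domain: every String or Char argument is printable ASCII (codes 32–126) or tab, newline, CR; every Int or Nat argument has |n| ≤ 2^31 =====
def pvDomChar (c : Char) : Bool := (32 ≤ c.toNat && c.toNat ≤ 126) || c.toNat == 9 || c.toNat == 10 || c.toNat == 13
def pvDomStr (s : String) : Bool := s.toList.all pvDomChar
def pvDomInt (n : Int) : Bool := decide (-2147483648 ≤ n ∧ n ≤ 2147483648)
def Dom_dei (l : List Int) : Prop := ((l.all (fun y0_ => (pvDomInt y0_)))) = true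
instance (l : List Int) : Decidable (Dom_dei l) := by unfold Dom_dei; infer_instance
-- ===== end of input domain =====

-- B replaces A's binary divide-and-conquer recursion by one accumulator loop (simpler);
-- A never returns on the empty list (infinite recursion), so Pre_ excludes it.

-- ===== PORT A =====
-- A's slices l[:m], l[m:] with 0 ≤ m ≤ len are exactly take/drop.
-- The `l.length = 0` branch is a totality guard only: Python recurses forever there
-- (dei([]) calls dei([]) twice); such inputs are excluded by Pre_dei.
def dei (l : List Int) : Int :=
  if l.length = 1 then
    let x := l.headI            -- l[0]
    if x ≤ 0 then x else 1
  else if l.length = 0 then 0   -- totality guard; Python diverges here (outside Pre_dei)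
  else
    let m := l.length / 2
    let aux1 := dei (l.take m)
    let aux2 := dei (l.drop m)
    aux1 * aux2
termination_by l.length
decreasing_by
  · simp only [List.length_take]; omega
  · simp only [List.length_drop]; omega

-- ===== PORT B =====
def dei_alt (l : List Int) : Int :=
  l.foldl (fun p x => p * (if x ≤ 0 then x else 1)) 1

-- ===== PRECONDITION & SPEC =====
-- Pre_ excludes the empty list, on which A recurses forever (dei([]) calls dei([]); Python raises RecursionError).
def Pre_dei (l : List Int) : Prop := l ≠ []
instance (l : List Int) : Decidable (Pre_dei l) := by unfold Pre_dei; infer_instance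
def pvWitness_dei : List Int := [3, -2, 0, 5]

def Spec_dei (l : List Int) (out : Int) : Prop := out = dei_alt l
instance (l : List Int) (out : Int) : Decidable (Spec_dei l out) := by unfold Spec_dei; infer_instance

-- ===== CLAIM (what is proved, stated in full; the proofs are below) =====
def Claim_equal_dei : Prop := ∀ (l : List Int), Dom_dei l → Pre_dei l → Spec_dei l (dei l)

-- ===== LEMMAS AND PROOFS =====

def deiMap (x : Int) : Int := if x ≤ 0 then x else 1

theorem dei_alt_foldl (l : List Int) (a : Int) :
    l.foldl (fun p x => p * (if x ≤ 0 then x else 1)) a = a * (l.map deiMap).prod := by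
  induction l generalizing a with
  | nil => simp
  | cons x xs ih =>
    rw [List.foldl_cons, ih, List.map_cons, List.prod_cons, deiMap, mul_assoc]

theorem dei_eq_prod : ∀ (l : List Int), l ≠ [] → dei l = (l.map deiMap).prod := by
  intro l
  induction hl : l.length using Nat.strong_induction_on generalizing l with
  | _ n ih =>
    intro hne
    rw [dei]
    by_cases h1 : l.length = 1
    · obtain ⟨x, hx⟩ : ∃ x, l = [x] := by
        cases l with
        | nil => simp at h1
        | cons a t => cases t with
          | nil => exact ⟨a, rfl⟩
          | cons b u => simp at h1
      subst hx
      simp [deiMap]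
    · have h0 : l.length ≠ 0 := by simpa using hne
      simp only [h1, h0, if_false]
      have hlen2 : 2 ≤ l.length := by omega
      have hm1 : 1 ≤ l.length / 2 := by omega
      have hm2 : l.length / 2 < l.length := by omega
      have htake : (l.take (l.length / 2)).length = l.length / 2 := by
        simp [List.length_take]; omega
      have hdrop : (l.drop (l.length / 2)).length = l.length - l.length / 2 := by
        simp [List.length_drop]
      have e1 : dei (l.take (l.length / 2)) = ((l.take (l.length / 2)).map deiMap).prod := by
        apply ih ((l.take (l.length / 2)).length) (by omega) _ rfl
        intro hc; rw [hc] at htake; simp at htake; omega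
      have e2 : dei (l.drop (l.length / 2)) = ((l.drop (l.length / 2)).map deiMap).prod := by
        apply ih ((l.drop (l.length / 2)).length) (by omega) _ rfl
        intro hc; rw [hc] at hdrop; simp at hdrop; omega
      rw [e1, e2, ← List.prod_append, ← List.map_append, List.take_append_drop]

-- ===== VERDICT (by name: the statement is the Claim_ definition above) =====
theorem dei_spec : Claim_equal_dei := by
  intro l _ hpre
  unfold Spec_dei dei_alt
  rw [dei_alt_foldl, dei_eq_prod l hpre, one_mul]
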